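-- pv_equiv track=rewrite | github.com/ComputerGeekNerd/Placement_Training | Python/q2_four_comb.py | combin
-- ===== SOURCE A (Python) =====
-- def combin(iterable, r):
--     # combinations('ABCD', 2) --> AB AC AD BC BD CD
--     # combinations(range(4), 3) --> 012 013 023 123
--     pool = tuple(iterable)
--     n = len(pool)
--     if r > n:
--         return
--     indices = list(range(r))
--     #yield tuple(pool[i] for i in indices)
--     yield tuple((tuple(pool[i] for i in indices),tuple(indices))) #Returns the first set of combinations
--     while True:
--         for i in reversed(range(r)):
--             if indices[i] != i + n - r:#the last combination will satisfy this and will return to main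
--                 break
--         else:
--             return
--         indices[i] += 1#the value which does satisfied the above condition is incremented and combinations starts from there
--         for j in range(i+1, r):
--             indices[j] = indices[j-1] + 1
--         #yield tuple(pool[i] for i in indices) #Returns tuple of combination elements
--         yield tuple((tuple(pool[i] for i in indices),tuple(indices)))
-- ===== SOURCE B (Python) =====
-- def combin(iterable, r):
--     pool = tuple(iterable)
--     n = len(pool)
--
--     def rec(need, start, chosen):
--         if need == 0:
--             yield (tuple(pool[i] for i in chosen), tuple(chosen))
--         else:
--             for i in range(start, n - need + 1):
--                 yield from rec(need - 1, i + 1, chosen + [i])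
--
--     if 0 <= r <= n:
--         yield from rec(r, 0, [])
-- ===== Notes on version B (the rewrite author's own statement) =====
-- stated objective: alternative
-- what changed: Replaced the iterative next-combination stepping loop (mutable index list, reversed scan, increment-and-reset) by a recursive backtracking enumerator that extends a chosen-index prefix, pruning starts that cannot complete a combination.
-- intended difference: For negative r A yields the single pair ((),()) (its empty range(r) makes the first yield fire), while B yields nothing, which is the intended result since there are no combinations of negative size. — e.g. on combin([], -1): A returns [([], [])], B returns []
import Mathlib
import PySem

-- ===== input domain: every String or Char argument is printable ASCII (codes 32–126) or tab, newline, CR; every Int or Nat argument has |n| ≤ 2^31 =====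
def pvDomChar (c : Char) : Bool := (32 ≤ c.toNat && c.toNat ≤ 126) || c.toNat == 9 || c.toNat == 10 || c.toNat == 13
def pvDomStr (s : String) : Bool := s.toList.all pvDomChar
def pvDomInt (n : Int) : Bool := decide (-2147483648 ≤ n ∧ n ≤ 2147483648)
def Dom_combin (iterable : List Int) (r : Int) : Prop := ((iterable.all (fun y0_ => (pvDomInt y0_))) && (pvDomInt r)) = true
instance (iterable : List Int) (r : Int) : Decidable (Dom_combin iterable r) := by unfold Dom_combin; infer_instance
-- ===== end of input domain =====

-- B replaces A's iterative next-combination loop (mutable index list, reversed scan,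
-- increment-and-reset) by a recursive backtracking enumerator extending a chosen-index
-- prefix; same cost, different algorithm ("alternative"). On r < 0 the two differ (D_ below).

-- ===== PORT A =====
-- tuple(pool[i] for i in indices), paired with tuple(indices)  (indices are always in range)
def pvEmit (pool : List Int) (idx : List Int) : List Int × List Int :=
  (idx.map (fun i => PySem.List.pyGetD pool i 0), idx)

-- 'for i in reversed(range(r)): if indices[i] != i + n - r: break / else: return':
-- scans i = k-1, k-2, …, 0; some i = first break index, none = the for-else 'return'
def pvFindBreak (indices : List Int) (n r : Int) : Nat → Option Int
  | 0 => none
  | k+1 => if PySem.List.pyGetD indices (k : Int) 0 ≠ (k : Int) + n - r then some (k : Int)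
           else pvFindBreak indices n r k

-- 'for j in range(i+1, r): indices[j] = indices[j-1] + 1'
def pvReset (indices : List Int) (i r : Int) : List Int :=
  (PySem.List.pyRange (i+1) r 1).foldl
    (fun ind j => PySem.List.pySetD ind j (PySem.List.pyGetD ind (j-1) 0 + 1)) indices

-- one iteration of the while body: none = the 'return', some = the updated indices
def pvNext (n r : Int) (indices : List Int) : Option (List Int) :=
  match pvFindBreak indices n r r.toNat with
  | none => none
  | some i => some (pvReset (PySem.List.pySetD indices i (PySem.List.pyGetD indices i 0 + 1)) i r)

-- 'while True: …' — fuel-bounded only to make the port total; (len+1)^r bounds the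
-- number of iterations (proved in pvF_len_le below), so the fuel is never exhausted
def pvLoop (pool : List Int) (n r : Int) (indices : List Int) : Nat → List (List Int × List Int)
  | 0 => []
  | fuel+1 =>
    match pvNext n r indices with
    | none => []
    | some d => pvEmit pool d :: pvLoop pool n r d fuel

def combin (iterable : List Int) (r : Int) : List (List Int × List Int) :=
  let pool := iterable
  let n : Int := (pool.length : Int)
  if r > n then []
  else
    let indices := PySem.List.pyRange 0 r 1
    pvEmit pool indices :: pvLoop pool n r indices ((pool.length + 1) ^ r.toNat)

-- ===== PORT B =====
-- 'def rec(need, start, chosen): if need == 0: yield …;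
--  else: for i in range(start, n - need + 1): yield from rec(need-1, i+1, chosen+[i])'
def combinRec (pool : List Int) (n : Int) : Nat → Int → List Int → List (List Int × List Int)
  | 0, _, chosen => [pvEmit pool chosen]
  | need+1, start, chosen =>
    (PySem.List.pyRange start (n - ((need:Int)+1) + 1) 1).flatMap
      (fun i => combinRec pool n need (i + 1) (chosen ++ [i]))

-- 'if 0 <= r <= n: yield from rec(r, 0, [])'
def combin_alt (iterable : List Int) (r : Int) : List (List Int × List Int) :=
  let pool := iterable
  let n : Int := (pool.length : Int)
  if 0 ≤ r ∧ r ≤ n then combinRec pool n r.toNat 0 [] else []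

-- ===== PRECONDITION & SPEC =====
-- For r < 0, A yields the single pair ((),()) (its empty range(r) lets the first yield fire),
-- while B yields nothing, which is the intended result: there are no combinations of negative size.
def D_combin (iterable : List Int) (r : Int) : Prop := r < 0
instance (iterable : List Int) (r : Int) : Decidable (D_combin iterable r) := by unfold D_combin; infer_instance

def Spec_combin (iterable : List Int) (r : Int) (out : List (List Int × List Int)) : Prop :=
  ¬ D_combin iterable r → out = combin_alt iterable r
instance (iterable : List Int) (r : Int) (out : List (List Int × List Int)) : Decidable (Spec_combin iterable r out) := by unfold Spec_combin; infer_instance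

def pvDiffWitness_combin : List Int × Int := ([], -1)
def pvDiffWitnessOut_combin : (List (List Int × List Int)) × (List (List Int × List Int)) :=
  ([([], [])], [])

-- ===== CLAIM (what is proved, stated in full; the proofs are below) =====
def Claim_unchanged_combin : Prop := ∀ (iterable : List Int) (r : Int), Dom_combin iterable r → Spec_combin iterable r (combin iterable r)
def Claim_changed_combin : Prop := Dom_combin (pvDiffWitness_combin.1) (pvDiffWitness_combin.2) ∧ D_combin (pvDiffWitness_combin.1) (pvDiffWitness_combin.2) ∧ combin (pvDiffWitness_combin.1) (pvDiffWitness_combin.2) = pvDiffWitnessOut_combin.1 ∧ combin_alt (pvDiffWitness_combin.1) (pvDiffWitness_combin.2) = pvDiffWitnessOut_combin.2 ∧ pvDiffWitnessOut_combin.1 ≠ pvDiffWitnessOut_combin.2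
def Claim_exact_combin : Prop := ∀ (iterable : List Int) (r : Int), Dom_combin iterable r → D_combin iterable r → combin iterable r ≠ combin_alt iterable r

-- ===== LEMMAS AND PROOFS =====

-- the reference enumeration: pvF n r s = all strictly increasing r-tuples over [s, n), lex order
def pvF (n : Int) : Nat → Int → List (List Int)
  | 0, _ => [[]]
  | (r+1), s => (PySem.List.pyRange s n 1).flatMap (fun i => (pvF n r (i+1)).map (i :: ·))

theorem pvF_block (n : Int) (r : Nat) (s : Int) (h : s < n) :
    pvF n (r+1) s = (pvF n r (s+1)).map (s :: ·) ++ pvF n (r+1) (s+1) := by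
  conv_lhs => rw [pvF, PySem.List.pyRange_one_cons h, List.flatMap_cons]
  rw [pvF]

theorem pvF_nil (n : Int) (r : Nat) : ∀ s : Int, 0 < r → n < s + r → pvF n r s = [] := by
  induction r with
  | zero => omega
  | succ r ih =>
    intro s _ hlt
    rw [pvF]
    rcases Nat.eq_zero_or_pos r with hr | hr
    · subst hr
      have : n ≤ s := by omega
      rw [PySem.List.pyRange_one_eq_nil this]
      rfl
    · rw [List.flatMap_eq_nil_iff]
      intro i hi
      have hmem := PySem.List.mem_pyRange_one.mp hi
      rw [ih (i+1) hr (by push_cast at hlt ⊢; omega)]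
      rfl

theorem pvF_length_mem (n : Int) (r : Nat) : ∀ s c, c ∈ pvF n r s → c.length = r := by
  induction r with
  | zero => intro s c hc; rw [pvF] at hc; simp at hc; simp [hc]
  | succ r ih =>
    intro s c hc
    rw [pvF] at hc
    simp only [List.mem_flatMap, List.mem_map] at hc
    obtain ⟨i, _, t, ht, rfl⟩ := hc
    simp [ih _ t ht]

theorem pvF_head (n : Int) (r : Nat) : ∀ s : Int, s + r ≤ n →
    (pvF n r s).head? = some (PySem.List.pyRange s (s + r) 1) := by
  induction r with
  | zero =>
    intro s _
    rw [pvF]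
    simp [PySem.List.pyRange_one_eq_nil (by omega : s + (0:Nat) ≤ s)]
  | succ r ih =>
    intro s hs
    rw [pvF_block n r s (by push_cast at hs; omega)]
    have hh := ih (s+1) (by push_cast at hs ⊢; omega)
    rw [List.head?_append, List.head?_map, hh]
    have hcons : PySem.List.pyRange s (s + (((r:Nat)+1:Nat):Int)) 1
        = s :: PySem.List.pyRange (s+1) (s+1+(r:Int)) 1 := by
      rw [show s + (((r:Nat)+1:Nat):Int) = s + 1 + (r:Int) by push_cast; ring]
      exact PySem.List.pyRange_one_cons (by omega)
    simp only [Option.map_some, Option.some_or]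
    rw [hcons]

theorem pvF_last (n : Int) (r : Nat) : ∀ s : Int, s + r ≤ n →
    (pvF n r s).getLast? = some (PySem.List.pyRange (n - r) n 1) := by
  induction r with
  | zero =>
    intro s _
    rw [pvF]
    simp [PySem.List.pyRange_one_eq_nil (by omega : n ≤ n - (0:Nat))]
  | succ r ih =>
    intro s hs
    push_cast at hs
    have hm : (0:Int) ≤ (n - s).toNat - (n - s) := by omega
    -- inner induction on (n - s).toNat
    generalize hms : (n - s - (r+1)).toNat = m
    induction m generalizing s with
    | zero =>
      -- s = n - (r+1) : last block
      have hseq : s = n - (r+1) := by omega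
      rw [pvF_block n r s (by omega)]
      have hrest : pvF n (r+1) (s+1) = [] := by
        rw [show ((r:Int)+1) = (((r+1:Nat)):Int) by push_cast; ring] at hseq
        exact pvF_nil n (r+1) (s+1) (by omega) (by push_cast; omega)
      rw [hrest, List.append_nil, List.getLast?_map, ih (s+1) (by omega)]
      have hcons : PySem.List.pyRange (n - (((r:Nat)+1:Nat):Int)) n 1
          = (n - ((r:Int)+1)) :: PySem.List.pyRange (n - (r:Int)) n 1 := by
        rw [show n - (((r:Nat)+1:Nat):Int) = n - ((r:Int)+1) by push_cast; ring]
        rw [PySem.List.pyRange_one_cons (by omega)]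
        rw [show n - ((r:Int)+1) + 1 = n - (r:Int) by ring]
      simp only [Option.map_some]
      rw [hcons, hseq]
    | succ m ihm =>
      rw [pvF_block n r s (by omega)]
      have hrest := ihm (s+1) (by omega) (by omega) (by omega)
      rw [List.getLast?_append, hrest]
      simp

theorem pvF_len_le (n : Int) (r : Nat) : ∀ s : Int, (pvF n r s).length ≤ ((n - s).toNat + 1) ^ r := by
  induction r with
  | zero => intro s; rw [pvF]; simp
  | succ r ih =>
    intro s
    rw [pvF, List.length_flatMap]
    have hb : ∀ x ∈ (PySem.List.pyRange s n 1).map (fun i => ((pvF n r (i+1)).map (i :: ·)).length),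
        x ≤ ((n - s).toNat) ^ r := by
      intro x hx
      simp only [List.mem_map] at hx
      obtain ⟨i, hi, rfl⟩ := hx
      have hmem := PySem.List.mem_pyRange_one.mp hi
      rw [List.length_map]
      calc (pvF n r (i+1)).length ≤ ((n - (i+1)).toNat + 1) ^ r := ih (i+1)
        _ ≤ ((n - s).toNat) ^ r := Nat.pow_le_pow_left (by omega) r
    calc ((PySem.List.pyRange s n 1).map (fun i => ((pvF n r (i+1)).map (i :: ·)).length)).sum
        ≤ ((PySem.List.pyRange s n 1).map (fun i => ((pvF n r (i+1)).map (i :: ·)).length)).length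
            * ((n - s).toNat) ^ r := by
          rw [← smul_eq_mul]
          exact List.sum_le_card_nsmul _ _ hb
      _ ≤ ((n - s).toNat + 1) ^ (r+1) := by
          rw [List.length_map, PySem.List.length_pyRange_one]
          calc (n - s).toNat * ((n - s).toNat) ^ r = ((n - s).toNat) ^ (r+1) := by ring
            _ ≤ ((n - s).toNat + 1) ^ (r+1) := Nat.pow_le_pow_left (Nat.le_succ _) _

-- positive-index cons lemmas
theorem pvGetD_cons_pos (a : Int) (xs : List Int) (j d : Int) (h : 1 ≤ j) :
    PySem.List.pyGetD (a :: xs) j d = PySem.List.pyGetD xs (j-1) d := by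
  obtain ⟨k, rfl⟩ : ∃ k : Nat, j = (k:Int) + 1 := ⟨(j-1).toNat, by omega⟩
  rw [show ((k:Int) + 1) = ((k+1 : Nat) : Int) by push_cast; ring,
     PySem.List.pyGetD_natCast]
  simp [PySem.List.pyGetD_natCast]

theorem pvSetD_cons_pos (a : Int) (xs : List Int) (j v : Int) (h : 1 ≤ j) :
    PySem.List.pySetD (a :: xs) j v = a :: PySem.List.pySetD xs (j-1) v := by
  obtain ⟨k, rfl⟩ : ∃ k : Nat, j = (k:Int) + 1 := ⟨(j-1).toNat, by omega⟩
  rw [show ((k:Int) + 1) = ((k+1 : Nat) : Int) by push_cast; ring,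
     PySem.List.pySetD_natCast]
  simp [PySem.List.pySetD_natCast]

theorem pvRange_succ_succ (a b : Int) :
    PySem.List.pyRange (a+1) (b+1) 1 = (PySem.List.pyRange a b 1).map (· + 1) := by
  rw [PySem.List.pyRange_one, PySem.List.pyRange_one, List.map_map]
  have : (b + 1 - (a + 1)).toNat = (b - a).toNat := by omega
  rw [this]
  apply List.map_congr_left
  intro k _
  simp; ring

-- findBreak lemmas
theorem pvFindBreak_none_of (c : List Int) (n r : Int) : ∀ K : Nat,
    (∀ k : Nat, k < K → PySem.List.pyGetD c (k : Int) 0 = (k : Int) + n - r) →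
    pvFindBreak c n r K = none := by
  intro K
  induction K with
  | zero => intro _; rfl
  | succ K ih =>
    intro h
    rw [pvFindBreak]
    rw [if_neg (by simpa using h K (Nat.lt_succ_self K))]
    exact ih (fun k hk => h k (Nat.lt_succ_of_lt hk))

theorem pvFindBreak_bounds (c : List Int) (n r : Int) : ∀ (K : Nat) (j : Int),
    pvFindBreak c n r K = some j → 0 ≤ j ∧ j < K := by
  intro K
  induction K with
  | zero => intro j h; simp [pvFindBreak] at h
  | succ K ih =>
    intro j h
    rw [pvFindBreak] at h
    split at h
    · obtain rfl : ((K:Int)) = j := by simpa using h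
      constructor <;> omega
    · have := ih j h
      constructor <;> omega

theorem pvFindBreak_cons (i : Int) (c : List Int) (n r : Int) : ∀ K : Nat,
    pvFindBreak (i :: c) n (r+1) (K+1) =
      (match pvFindBreak c n r K with
      | some j => some (j+1)
      | none => if i = n - (r+1) then none else some 0) := by
  intro K
  induction K with
  | zero =>
    rw [pvFindBreak, pvFindBreak]
    simp only [Nat.cast_zero]
    have hget : PySem.List.pyGetD (i :: c) (0:Int) 0 = i := by
      simp [show ((0:Nat):Int) = (0:Int) from rfl, PySem.List.pyGetD_natCast]
    rw [hget]
    by_cases hi : i = n - (r+1)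
    · rw [if_neg (by omega)]
      simp [pvFindBreak, hi]
    · rw [if_pos (by omega)]
      simp [pvFindBreak, hi]
  | succ K ih =>
    rw [pvFindBreak]
    have hget : PySem.List.pyGetD (i :: c) ((K+1 : Nat) : Int) 0
        = PySem.List.pyGetD c ((K:Nat) : Int) 0 := by
      rw [pvGetD_cons_pos _ _ _ _ (by push_cast; omega)]
      congr 1
      push_cast; ring
    rw [hget]
    by_cases hb : PySem.List.pyGetD c ((K:Nat):Int) 0 ≠ ((K:Nat):Int) + n - r
    · rw [if_pos (by push_cast; push_cast at hb; omega)]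
      conv_rhs => rw [pvFindBreak]
      rw [if_pos hb]
      simp
    · simp only [ne_eq, not_not] at hb
      rw [if_neg (by push_cast; omega)]
      conv_rhs => rw [pvFindBreak]
      rw [if_neg (by omega)]
      exact ih

-- reset lemmas
theorem pvFoldl_step_shift : ∀ (l : List Int) (i : Int) (xs : List Int), (∀ j ∈ l, 1 ≤ j) →
    l.foldl (fun ind j => PySem.List.pySetD ind (j+1) (PySem.List.pyGetD ind (j+1-1) 0 + 1)) (i :: xs)
      = i :: l.foldl (fun ind j => PySem.List.pySetD ind j (PySem.List.pyGetD ind (j-1) 0 + 1)) xs := by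
  intro l
  induction l with
  | nil => intro i xs _; rfl
  | cons j1 t ih =>
    intro i xs hl
    have hj1 : 1 ≤ j1 := hl j1 (by simp)
    rw [List.foldl_cons, List.foldl_cons]
    have hstep : PySem.List.pySetD (i :: xs) (j1+1) (PySem.List.pyGetD (i :: xs) (j1+1-1) 0 + 1)
        = i :: PySem.List.pySetD xs j1 (PySem.List.pyGetD xs (j1-1) 0 + 1) := by
      rw [show j1 + 1 - 1 = j1 by ring]
      rw [pvGetD_cons_pos _ _ _ _ hj1]
      rw [pvSetD_cons_pos _ _ _ _ (by omega)]
      rw [show j1 + 1 - 1 = j1 by ring]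
    rw [hstep]
    exact ih i _ (fun j hj => hl j (by simp [hj]))

theorem pvReset_cons (i : Int) (xs : List Int) (j : Int) (r : Nat) (hj : 0 ≤ j) :
    pvReset (i :: xs) (j+1) ((r:Int)+1) = i :: pvReset xs j r := by
  unfold pvReset
  rw [show j + 1 + 1 = (j + 1) + 1 by ring]
  rw [pvRange_succ_succ (j+1) (r:Int), List.foldl_map]
  exact pvFoldl_step_shift _ i xs (fun x hx => (PySem.List.mem_pyRange_one.mp hx).1.trans' (by omega))

theorem pvReset_all : ∀ (r : Nat) (v : Int) (xs : List Int), xs.length = r →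
    pvReset (v :: xs) 0 ((r:Int)+1) = PySem.List.pyRange v (v + r + 1) 1 := by
  intro r
  induction r with
  | zero =>
    intro v xs hx
    rw [List.length_eq_zero_iff] at hx
    subst hx
    unfold pvReset
    rw [PySem.List.pyRange_one_eq_nil (by simp), List.foldl_nil,
        show v + ((0:Nat):Int) + 1 = v + 1 by norm_num,
        PySem.List.pyRange_one_singleton]
  | succ r ih =>
    intro v xs hx
    match xs with
    | y :: ys =>
      have hys : ys.length = r := by simpa using hx
      unfold pvReset
      rw [show (0:Int) + 1 = 1 by ring]
      rw [PySem.List.pyRange_one_cons (by push_cast; omega), List.foldl_cons]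
      have hstep : PySem.List.pySetD (v :: y :: ys) 1 (PySem.List.pyGetD (v :: y :: ys) (1-1) 0 + 1)
          = v :: (v+1) :: ys := by
        rw [show (1:Int) - 1 = 0 by ring]
        rw [show ((0:Int)) = ((0:Nat):Int) by rfl, PySem.List.pyGetD_natCast]
        rw [show ((1:Int)) = ((1:Nat):Int) by rfl, PySem.List.pySetD_natCast]
        rfl
      rw [hstep]
      rw [show ((r:Nat)+1:Nat) = (r+1:Nat) from rfl]
      rw [show (((r+1:Nat)):Int) + 1 = ((r:Int) + 1) + 1 by push_cast; ring]
      rw [pvRange_succ_succ 1 ((r:Int)+1), List.foldl_map]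
      rw [pvFoldl_step_shift _ v ((v+1) :: ys)
            (fun x hx => (PySem.List.mem_pyRange_one.mp hx).1)]
      have := ih (v+1) ys hys
      unfold pvReset at this
      rw [show (0:Int) + 1 = 1 by ring] at this
      rw [this]
      rw [PySem.List.pyRange_one_cons (show v < v + ((r+1:Nat):Int) + 1 by push_cast; omega)]
      congr 1
      push_cast
      ring_nf

-- pvNext characterisation
theorem pvGetD_pyRange (a b : Int) (k : Nat) (h : (k:Int) < b - a) :
    PySem.List.pyGetD (PySem.List.pyRange a b 1) (k:Int) 0 = a + k := by
  rw [PySem.List.pyGetD_natCast]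
  rw [List.getD_eq_getElem?_getD]
  rw [List.getElem?_eq_getElem (by rw [PySem.List.length_pyRange_one]; omega)]
  rw [PySem.List.getElem_pyRange_one]
  rfl

theorem pvNext_terminal (n : Int) (r : Nat) : pvNext n r (PySem.List.pyRange (n - r) n 1) = none := by
  unfold pvNext
  rw [pvFindBreak_none_of _ _ _ _ (by
    intro k hk
    rw [Int.toNat_natCast] at hk
    rw [pvGetD_pyRange _ _ _ (by omega)]
    ring)]

theorem pvNext_cons (n : Int) (r : Nat) (c : List Int) (hc : c.length = r) (i : Int) :
    pvNext n ((r:Int)+1) (i :: c) =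
      (match pvNext n r c with
      | some d => some (i :: d)
      | none => if i = n - ((r:Int)+1) then none
                else some (PySem.List.pyRange (i+1) (i + (r:Int) + 2) 1)) := by
  unfold pvNext
  rw [show (((r:Int)+1)).toNat = r + 1 by omega, Int.toNat_natCast]
  rw [pvFindBreak_cons i c n (r:Int) r]
  cases hfb : pvFindBreak c n (r:Int) r with
  | some j =>
    obtain ⟨hj0, hjr⟩ := pvFindBreak_bounds c n (r:Int) r j hfb
    simp only
    rw [pvGetD_cons_pos _ _ _ _ (by omega), show j + 1 - 1 = j by ring]
    rw [pvSetD_cons_pos _ _ _ _ (by omega), show j + 1 - 1 = j by ring]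
    rw [pvReset_cons _ _ _ _ hj0]
  | none =>
    simp only
    by_cases hi : i = n - ((r:Int)+1)
    · rw [if_pos hi, if_pos hi]
    · rw [if_neg hi, if_neg hi]
      have hget0 : PySem.List.pyGetD (i :: c) (0:Int) 0 = i := by
        rw [show ((0:Int)) = ((0:Nat):Int) from rfl, PySem.List.pyGetD_natCast]; rfl
      have hset0 : PySem.List.pySetD (i :: c) (0:Int) (i + 1) = (i+1) :: c := by
        rw [show ((0:Int)) = ((0:Nat):Int) from rfl, PySem.List.pySetD_natCast]; rfl
      simp only
      rw [hget0, hset0]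
      rw [pvReset_all r (i+1) c hc]
      congr 2
      push_cast; ring

-- chain
theorem pvChain'_imp_mem {α : Type} {R S : α → α → Prop} :
    ∀ l : List α, (∀ a ∈ l, ∀ b ∈ l, R a b → S a b) → List.IsChain R l → List.IsChain S l := by
  intro l
  induction l with
  | nil => intro _ _; exact List.isChain_nil
  | cons a t ih =>
    intro h hc
    match t, hc with
    | [], _ => exact List.isChain_singleton a
    | b :: t', hc =>
      rw [List.isChain_cons_cons] at hc ⊢
      exact ⟨h a (by simp) b (by simp) hc.1,
        ih (fun x hx y hy hr => h x (by simp [hx]) y (by simp [hy]) hr) hc.2⟩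

theorem pvChain_block (n : Int) (r : Nat) (s : Int)
    (ih : ∀ s' : Int, s' + r ≤ n → List.IsChain (fun c d => pvNext n r c = some d) (pvF n r s'))
    (hs : s + 1 + (r:Int) ≤ n) :
    List.IsChain (fun c d => pvNext n ((r+1:Nat):Int) c = some d) ((pvF n r (s+1)).map (s :: ·)) := by
  have hinner := pvChain'_imp_mem (R := fun c d => pvNext n (r:Int) c = some d)
      (S := fun c d => (pvNext n (r:Int) c = some d) ∧ c.length = r)
      (pvF n r (s+1))
      (fun a ha b _ hr => ⟨hr, pvF_length_mem n r (s+1) a ha⟩)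
      (ih (s+1) (by omega))
  refine List.isChain_map_of_isChain (fun t => s :: t) (fun a b hab => ?_) hinner
  rw [show ((r+1:Nat):Int) = (r:Int)+1 by push_cast; ring, pvNext_cons n r a hab.2 s, hab.1]

theorem pvChain (n : Int) (r : Nat) : ∀ s : Int, s + r ≤ n →
    List.IsChain (fun c d => pvNext n r c = some d) (pvF n r s) := by
  induction r with
  | zero => intro s _; rw [pvF]; exact List.isChain_singleton []
  | succ r ih =>
    intro s hs
    push_cast at hs
    generalize hms : (n - s - (r+1)).toNat = m
    induction m generalizing s with
    | zero =>
      have hseq : s = n - (r+1) := by omega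
      rw [pvF_block n r s (by omega)]
      rw [pvF_nil n (r+1) (s+1) (by omega) (by push_cast; omega), List.append_nil]
      exact pvChain_block n r s ih (by omega)
    | succ m ihm =>
      rw [pvF_block n r s (by omega)]
      rw [List.isChain_append]
      refine ⟨pvChain_block n r s ih (by omega), ihm (s+1) (by omega) (by omega), ?_⟩
      intro x hx y hy
      rw [List.getLast?_map, pvF_last n r (s+1) (by push_cast; omega)] at hx
      simp only [Option.map_some, Option.mem_def, Option.some.injEq] at hx
      rw [pvF_head n (r+1) (s+1) (by push_cast; omega)] at hy
      simp only [Option.mem_def, Option.some.injEq] at hy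
      subst hx; subst hy
      rw [show ((r+1:Nat):Int) = (r:Int)+1 by push_cast; ring]
      rw [pvNext_cons n r _ (by rw [PySem.List.length_pyRange_one]; omega) s]
      rw [pvNext_terminal n r]
      rw [if_neg (by omega)]
      simp only
      congr 2
      push_cast; ring


-- the while loop follows a chain
theorem pvRun (pool : List Int) (n r : Int) :
    ∀ (l : List (List Int)) (c : List Int) (fuel : Nat),
      List.IsChain (fun c d => pvNext n r c = some d) (c :: l) →
      pvNext n r ((c :: l).getLast (List.cons_ne_nil c l)) = none →
      l.length ≤ fuel →
      pvLoop pool n r c fuel = l.map (pvEmit pool) := by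
  intro l
  induction l with
  | nil =>
    intro c fuel _ hlast _
    simp only [List.getLast_singleton] at hlast
    cases fuel with
    | zero => rfl
    | succ f => rw [pvLoop, hlast]; rfl
  | cons d l' ih =>
    intro c fuel hchain hlast hfuel
    have hcd : pvNext n r c = some d := (List.isChain_cons_cons.mp hchain).1
    cases fuel with
    | zero => simp at hfuel
    | succ f =>
      rw [pvLoop, hcd]
      simp only [List.map_cons]
      congr 1
      refine ih d f (List.isChain_cons_cons.mp hchain).2 ?_ (by simpa using hfuel)
      rw [← hlast, List.getLast_cons (List.cons_ne_nil d l')]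

-- B equals the reference enumeration
theorem combinRec_pvF (pool : List Int) (n : Int) :
    ∀ (k : Nat) (start : Int) (chosen : List Int),
      combinRec pool n k start chosen = (pvF n k start).map (fun t => pvEmit pool (chosen ++ t)) := by
  intro k
  induction k with
  | zero =>
    intro start chosen
    rw [combinRec, pvF]
    simp
  | succ k ih =>
    intro start chosen
    rw [combinRec, pvF]
    by_cases hsb : start ≤ n - k
    · rw [PySem.List.pyRange_one_append start (n - (k:Int)) n hsb (by omega)]
      rw [List.flatMap_append, List.map_append]
      have htail : (PySem.List.pyRange (n - (k:Int)) n 1).flatMap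
          (fun i => ((pvF n k (i+1)).map (i :: ·))) = [] := by
        rw [List.flatMap_eq_nil_iff]
        intro i hi
        have hmem := PySem.List.mem_pyRange_one.mp hi
        rcases Nat.eq_zero_or_pos k with hk | hk
        · subst hk; simp at hmem; omega
        · rw [pvF_nil n k (i+1) hk (by omega)]
          rfl
      rw [htail, List.map_nil, List.append_nil]
      rw [show n - ((k:Int)+1) + 1 = n - (k:Int) by ring]
      rw [List.map_flatMap]
      apply List.flatMap_congr
      intro i _
      rw [ih (i+1) (chosen ++ [i]), List.map_map]
      apply List.map_congr_left
      intro t _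
      simp [Function.comp, List.append_assoc]
    · rw [show n - ((k:Int)+1) + 1 = n - (k:Int) by ring]
      rw [PySem.List.pyRange_one_eq_nil (by omega)]
      rw [List.flatMap_nil]
      symm
      rw [List.map_eq_nil_iff, List.flatMap_eq_nil_iff]
      intro i hi
      have hmem := PySem.List.mem_pyRange_one.mp hi
      have hk : 0 < k := by omega
      rw [pvF_nil n k (i+1) hk (by omega)]
      rfl

theorem combin_eq_of_le (iterable : List Int) (r : Int) (h0 : 0 ≤ r)
    (hn1 : r ≤ (iterable.length : Int)) :
    combin iterable r = combin_alt iterable r := by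
  set n : Int := (iterable.length : Int) with hndef
  set R : Nat := r.toNat with hR
  have hrR : (R:Int) = r := by omega
  -- B side
  have hB : combin_alt iterable r = (pvF n R 0).map (pvEmit iterable) := by
    unfold combin_alt
    rw [if_pos ⟨h0, hn1⟩]
    rw [combinRec_pvF iterable n R 0 []]
    simp
  -- A side
  obtain ⟨l, hF⟩ : ∃ l, pvF n R 0 = PySem.List.pyRange 0 r 1 :: l := by
    have hh := pvF_head n R 0 (by omega)
    cases hFc : pvF n R 0 with
    | nil => rw [hFc] at hh; simp at hh
    | cons c l =>
      rw [hFc] at hh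
      simp only [List.head?_cons, Option.some.injEq] at hh
      exact ⟨l, by rw [hh, show (0:Int) + (R:Int) = r by omega]⟩
  have hchain : List.IsChain (fun c d => pvNext n (R:Int) c = some d) (PySem.List.pyRange 0 r 1 :: l) := by
    rw [← hF]
    exact pvChain n R 0 (by omega)
  have hlast : pvNext n (R:Int) ((PySem.List.pyRange 0 r 1 :: l).getLast (List.cons_ne_nil _ _)) = none := by
    have hl := pvF_last n R 0 (by omega)
    rw [hF, List.getLast?_eq_some_getLast (List.cons_ne_nil _ _)] at hl
    simp only [Option.some.injEq] at hl
    rw [hl]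
    exact pvNext_terminal n R
  have hfuel : l.length ≤ (iterable.length + 1) ^ R := by
    have := pvF_len_le n R 0
    rw [hF] at this
    simp only [List.length_cons] at this
    have hnn : (n - 0).toNat = iterable.length := by omega
    rw [hnn] at this
    omega
  have hA : combin iterable r
      = pvEmit iterable (PySem.List.pyRange 0 r 1)
        :: pvLoop iterable n r (PySem.List.pyRange 0 r 1) ((iterable.length + 1) ^ R) := by
    unfold combin
    rw [if_neg (by omega)]
  rw [hrR] at hchain hlast
  rw [hA, hB, hF]
  rw [pvRun iterable n r l (PySem.List.pyRange 0 r 1) _ hchain hlast hfuel]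
  simp

theorem combin_neg_A (iterable : List Int) (r : Int) (h : r < 0) :
    combin iterable r = [([], [])] := by
  unfold combin
  rw [if_neg (by simp; omega)]
  rw [PySem.List.pyRange_one_eq_nil (by omega)]
  rw [show r.toNat = 0 by omega]
  rw [pow_zero]
  have hnext : pvNext (iterable.length : Int) r [] = none := by
    unfold pvNext
    rw [show r.toNat = 0 by omega]
    rfl
  show pvEmit iterable [] :: pvLoop iterable (iterable.length : Int) r [] 1 = [([], [])]
  rw [pvLoop.eq_def, hnext]
  rfl

theorem combin_neg_B (iterable : List Int) (r : Int) (h : r < 0) :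
    combin_alt iterable r = [] := by
  unfold combin_alt
  rw [if_neg (by omega)]

-- ===== VERDICT (by name: the statement is the Claim_ definition above) =====
theorem combin_spec : Claim_unchanged_combin := by
  intro iterable r _ hD
  unfold D_combin at hD
  show combin iterable r = combin_alt iterable r
  rw [Int.not_lt] at hD
  by_cases hgt : r > (iterable.length : Int)
  · have hA : combin iterable r = [] := by simp [combin, hgt]
    have hB : combin_alt iterable r = [] := by
      unfold combin_alt
      rw [if_neg (by simp; omega)]
    rw [hA, hB]
  · exact combin_eq_of_le iterable r hD (by omega)

theorem combin_changed : Claim_changed_combin := by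
  unfold Claim_changed_combin
  refine ⟨by decide, by decide, combin_neg_A [] (-1) (by norm_num), ?_, by decide⟩
  exact combin_neg_B [] (-1) (by norm_num)

theorem combin_tight : Claim_exact_combin := by
  intro iterable r _ hD
  rw [combin_neg_A iterable r hD, combin_neg_B iterable r hD]
  simp
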